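-- pv_equiv track=rewrite | github.com/kakato10/hackBulgariaAlgorithmsCourseApplication | 3.brackets/brackets.py | middle_bracket_evaluate
-- ===== SOURCE A (Python) =====
-- def find_next_number(expression, starting_index):
--     number = '0'
--     i = starting_index + 1
--     while i < len(expression):
--         symbol = expression[i]
--         if symbol in ['{', '[', '(', ')', ']', '}']:
--             break
--         else:
--             number = number + symbol
--             i = i + 1
--     return {
--         'next_bracket_index': i,
--         'value': int(number)
--     }
--
-- def middle_bracket_evaluate(expression, starting_index):
--     value = 0
--     closing_index = None
--     i = starting_index
--     while i < len(expression):
--         symbol = expression[i]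
--         if symbol == '(':
--             result = find_next_number(expression, i)
--             value = value + 2 * result['value']
--             i = result['next_bracket_index']
--             continue
--         elif symbol == ']':
--             closing_index = i
--             break
--         else:
--             find_next_number(expression, i)
--             result = find_next_number(expression, i)
--             value = value + result['value']
--             i = result['next_bracket_index']
--             continue
--         i = i + 1
--
--     return {
--         'value': value,
--         'closing_index': closing_index
--     }
-- ===== SOURCE B (Python) =====
-- # B: recursive tokenizer (marker, value) + separate summing pass, instead of A's
-- # single accumulator loop with a helper called per marker. Same return value.
--
-- def _tokenize(expression, index):
--     if index >= len(expression):
--         return [], None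
--     marker = expression[index]
--     if marker == ']':
--         return [], index
--     end = index + 1
--     while end < len(expression) and expression[end] not in '{[()]}':
--         end += 1
--     value = int('0' + ''.join(expression[k] for k in range(index + 1, end)))
--     rest, closing_index = _tokenize(expression, end)
--     return [(marker, value)] + rest, closing_index
--
--
-- def middle_bracket_evaluate(expression, starting_index):
--     tokens, closing_index = _tokenize(expression, starting_index)
--     value = sum(2 * v if c == '(' else v for c, v in tokens)
--     return {'value': value, 'closing_index': closing_index}
-- ===== Notes on version B (the rewrite author's own statement) =====
-- stated objective: alternative
-- what changed: A's single while-loop that accumulates the value as it scans (doubling inside the '(' branch, with a per-marker helper) is replaced by a recursive tokenizer that first builds the list of (marker, value) tokens plus the closing index, followed by a separate summing pass over the tokens; the run after a marker is delimited first and then parsed in one piece.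
import Mathlib
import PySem

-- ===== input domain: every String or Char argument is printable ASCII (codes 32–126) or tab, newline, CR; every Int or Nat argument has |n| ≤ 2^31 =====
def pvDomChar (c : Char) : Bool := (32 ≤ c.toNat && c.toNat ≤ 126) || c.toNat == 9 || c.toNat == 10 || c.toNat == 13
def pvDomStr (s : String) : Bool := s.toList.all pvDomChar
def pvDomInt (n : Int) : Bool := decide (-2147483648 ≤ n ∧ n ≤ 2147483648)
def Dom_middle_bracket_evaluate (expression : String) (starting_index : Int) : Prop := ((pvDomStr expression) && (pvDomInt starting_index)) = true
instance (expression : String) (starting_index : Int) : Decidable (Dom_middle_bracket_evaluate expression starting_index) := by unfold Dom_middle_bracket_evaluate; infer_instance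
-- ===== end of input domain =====

-- B re-structures A as a recursive tokenizer (marker/value token list + closing index) followed by
-- a separate summing pass; same return value wherever A returns (objective: alternative decomposition).


-- ===== PORT A =====

-- symbol in ['{', '[', '(', ')', ']', '}']
def pvIsBracketA (c : Char) : Bool := ['{', '[', '(', ')', ']', '}'].contains c

-- the while-loop of find_next_number: number accumulates non-bracket chars from index i on
def pvFnnLoop (cs : List Char) (number : List Char) (i : Int) : List Char × Int :=
  if _h : i < PySem.List.len cs then
    match PySem.List.pyGet? cs i with
    | none => (number, i)      -- Python IndexError (i < -len); unreachable from A's calls, totalized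
    | some symbol =>
      if pvIsBracketA symbol then (number, i)
      else pvFnnLoop cs (number ++ [symbol]) (i + 1)
  else (number, i)
termination_by (PySem.List.len cs - i).toNat
decreasing_by simp [PySem.List.len_eq] at *; omega

lemma pvFnnLoop_snd_ge (cs : List Char) (number : List Char) (i : Int) :
    i ≤ (pvFnnLoop cs number i).2 := by
  fun_induction pvFnnLoop
  all_goals simp_all
  all_goals omega

-- find_next_number: returns (next_bracket_index, int(number)); none = int's ValueError
def pvFindNextNumber (cs : List Char) (starting_index : Int) : Option (Int × Int) :=
  match pvFnnLoop cs ['0'] (starting_index + 1) with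
  | (number, idx) =>
    match PySem.Int.ofChars? number with
    | none => none
    | some v => some (idx, v)

lemma pvFindNextNumber_snd_ge (cs : List Char) (i : Int) {idx v : Int}
    (h : pvFindNextNumber cs i = some (idx, v)) : i + 1 ≤ idx := by
  have hg := pvFnnLoop_snd_ge cs ['0'] (i + 1)
  unfold pvFindNextNumber at h
  rcases hE : pvFnnLoop cs ['0'] (i + 1) with ⟨num, j⟩
  rw [hE] at h hg
  cases hO : PySem.Int.ofChars? num
  · simp [hO] at h
  · simp [hO] at h
    omega

-- the main while-loop of middle_bracket_evaluate; none = an exception escaped the loop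
def pvMbeLoop (cs : List Char) (value : Int) (i : Int) : Option (Int × Option Int) :=
  if _h : i < PySem.List.len cs then
    match PySem.List.pyGet? cs i with
    | none => none             -- IndexError (i < -len): Python A raises, excluded by Pre_
    | some symbol =>
      if symbol = '(' then
        match h1 : pvFindNextNumber cs i with
        | none => none         -- ValueError from int(number), excluded by Pre_
        | some (idx, v) => pvMbeLoop cs (value + 2 * v) idx
      else if symbol = ']' then some (value, some i)
      else
        let _ := pvFindNextNumber cs i   -- A calls find_next_number twice here; first result discarded
        match _hfnn : pvFindNextNumber cs i with
        | none => none
        | some (idx, v) => pvMbeLoop cs (value + v) idx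
  else some (value, none)
termination_by (PySem.List.len cs - i).toNat
decreasing_by
  · have := pvFindNextNumber_snd_ge cs i h1; simp [PySem.List.len_eq] at *; omega
  · have := pvFindNextNumber_snd_ge cs i _hfnn; simp [PySem.List.len_eq] at *; omega

def middle_bracket_evaluate (expression : String) (starting_index : Int) : List (String × Option Int) :=
  match pvMbeLoop expression.toList 0 starting_index with
  | some (v, c) => [("value", some v), ("closing_index", c)]
  | none => []                 -- Python A raised; outside Pre_

-- ===== PORT B =====

-- c not in '{[()]}'
def pvBracketsB : List Char := "{[()]}".toList

-- the run-delimiting while loop of _tokenize: first j ≥ start that is past the end,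
-- unindexable (IndexError position), or a bracket
def pvScanEnd (cs : List Char) (j : Int) : Int :=
  if _h : j < PySem.List.len cs then
    match PySem.List.pyGet? cs j with
    | none => j
    | some c => if pvBracketsB.contains c then j else pvScanEnd cs (j + 1)
  else j
termination_by (PySem.List.len cs - j).toNat
decreasing_by simp [PySem.List.len_eq] at *; omega

lemma pvScanEnd_ge (cs : List Char) (j : Int) : j ≤ pvScanEnd cs j := by
  fun_induction pvScanEnd
  all_goals simp_all
  all_goals omega

-- _tokenize: token list plus closing index; none = the exception A would raise
def pvTokenize (cs : List Char) (index : Int) : Option (List (Char × Int) × Option Int) :=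
  if _h : index < PySem.List.len cs then
    match PySem.List.pyGet? cs index with
    | none => none
    | some marker =>
      if marker = ']' then some ([], some index)
      else
        let e := pvScanEnd cs (index + 1)
        let run := (PySem.List.pyRange (index + 1) e 1).map (fun k => PySem.List.pyGetD cs k ' ')
        match PySem.Int.ofChars? ('0' :: run) with
        | none => none
        | some v =>
          match pvTokenize cs e with
          | none => none
          | some (rest, closing) => some ((marker, v) :: rest, closing)
  else some ([], none)
termination_by (PySem.List.len cs - index).toNat
decreasing_by have := pvScanEnd_ge cs (index + 1); simp [PySem.List.len_eq] at *; omega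

def middle_bracket_evaluate_alt (expression : String) (starting_index : Int) : List (String × Option Int) :=
  match pvTokenize expression.toList starting_index with
  | none => []
  | some (tokens, closing) =>
    let value := (tokens.map (fun t => if t.1 = '(' then 2 * t.2 else t.2)).sum
    [("value", some value), ("closing_index", closing)]

-- ===== PRECONDITION & SPEC =====
-- Pre_: exactly the inputs on which Python A returns (no IndexError from an unindexable position,
-- and every run of non-bracket characters scanned before the terminating ']' parses via int('0'+run)).
-- The scanned characters are written out directly (Python's negative start wraps, so the scan reads
-- the tail cs[n+s:] and then the whole string).
def pvPreCheck (expression : String) (starting_index : Int) : Bool :=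
  let cs := expression.toList
  let n : Int := cs.length
  if n ≤ starting_index then true
  else if starting_index < -n then false
  else
    let L := if starting_index < 0 then cs.drop (n + starting_index).toNat ++ cs
             else cs.drop starting_index.toNat
    match L with
    | [] => true
    | m :: rest =>
      if m = ']' then true
      else ((rest.takeWhile (fun c => c ≠ ']')).splitOnP (fun c => "{[()]}".toList.contains c)).all
             (fun seg => (PySem.Int.ofChars? ('0' :: seg)).isSome)

def Pre_middle_bracket_evaluate (expression : String) (starting_index : Int) : Prop :=
  pvPreCheck expression starting_index = true
instance (expression : String) (starting_index : Int) : Decidable (Pre_middle_bracket_evaluate expression starting_index) := by unfold Pre_middle_bracket_evaluate; infer_instance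

def pvWitness_middle_bracket_evaluate : String × Int := ("(12]x", 0)

def Spec_middle_bracket_evaluate (expression : String) (starting_index : Int) (out : List (String × Option Int)) : Prop := out = middle_bracket_evaluate_alt expression starting_index
instance (expression : String) (starting_index : Int) (out : List (String × Option Int)) : Decidable (Spec_middle_bracket_evaluate expression starting_index out) := by unfold Spec_middle_bracket_evaluate; infer_instance

-- ===== CLAIM (what is proved, stated in full; the proofs are below) =====
def Claim_equal_middle_bracket_evaluate : Prop := ∀ (expression : String) (starting_index : Int), Dom_middle_bracket_evaluate expression starting_index → Pre_middle_bracket_evaluate expression starting_index → Spec_middle_bracket_evaluate expression starting_index (middle_bracket_evaluate expression starting_index)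

-- ===== LEMMAS AND PROOFS =====

-- the two char-class tests agree
lemma pvBracket_eq (c : Char) : (c ∈ pvBracketsB) = (pvIsBracketA c = true) := by
  have hB : pvBracketsB = ['{', '[', '(', ')', ']', '}'] := rfl
  simp [hB, pvIsBracketA]

-- A's accumulate-as-you-scan number loop = B's delimit-then-read of the same run
lemma pvFnnLoop_eq_scan (cs : List Char) (number : List Char) (j : Int) :
    pvFnnLoop cs number j =
      (number ++ (PySem.List.pyRange j (pvScanEnd cs j) 1).map (fun k => PySem.List.pyGetD cs k ' '),
       pvScanEnd cs j) := by
  fun_induction pvFnnLoop with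
  | case1 number j h hG =>
    have hSE : pvScanEnd cs j = j := by rw [pvScanEnd]; simp [hG]
    rw [hSE]; simp
  | case2 number j h symbol hG hB =>
    have hSE : pvScanEnd cs j = j := by rw [pvScanEnd]; simp [hG, pvBracket_eq, hB]
    rw [hSE]; simp
  | case3 number j h symbol hG hB ih =>
    simp only [PySem.List.len_eq] at h
    have hSE : pvScanEnd cs j = pvScanEnd cs (j + 1) := by
      rw [pvScanEnd]; simp [h, hG, pvBracket_eq, hB]
    have hlt : j < pvScanEnd cs (j + 1) := lt_of_lt_of_le (by omega) (pvScanEnd_ge cs (j + 1))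
    rw [ih, hSE, PySem.List.pyRange_one_cons hlt]
    simp [PySem.List.pyGetD, hG]
  | case4 number j h =>
    simp only [PySem.List.len_eq] at h
    have hSE : pvScanEnd cs j = j := by rw [pvScanEnd]; simp [h]
    rw [hSE]; simp

lemma pvFindNextNumber_eq (cs : List Char) (i : Int) :
    pvFindNextNumber cs i =
      (PySem.Int.ofChars? ('0' :: (PySem.List.pyRange (i + 1) (pvScanEnd cs (i + 1)) 1).map
          (fun k => PySem.List.pyGetD cs k ' '))).map (fun v => (pvScanEnd cs (i + 1), v)) := by
  unfold pvFindNextNumber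
  rw [pvFnnLoop_eq_scan]
  rcases hO : PySem.Int.ofChars? ('0' :: (PySem.List.pyRange (i + 1) (pvScanEnd cs (i + 1)) 1).map
      (fun k => PySem.List.pyGetD cs k ' ')) with _ | v
  all_goals simp [hO]

-- main invariant: A's loop with accumulator `value` = B's tokenizer followed by the summing pass
lemma pvLoop_eq_tokenize (cs : List Char) (i : Int) (value : Int) :
    pvMbeLoop cs value i =
      (pvTokenize cs i).map
        (fun p => (value + (p.1.map (fun t => if t.1 = '(' then 2 * t.2 else t.2)).sum, p.2)) := by
  fun_induction pvMbeLoop with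
  | case1 value i hlt hGet =>
    simp only [PySem.List.len_eq] at hlt
    rw [pvTokenize]; simp [hlt, hGet]
  | case2 value i hlt hFnn hGet =>
    -- '(' marker, find_next_number raised (int ValueError); both sides none
    simp only [PySem.List.len_eq] at hlt
    rw [pvFindNextNumber_eq] at hFnn
    rw [pvTokenize]
    rcases hO : PySem.Int.ofChars? ('0' :: (PySem.List.pyRange (i + 1) (pvScanEnd cs (i + 1)) 1).map
        (fun k => PySem.List.pyGetD cs k ' ')) with _ | v
    · simp [hlt, hGet, hO]
    · rw [hO] at hFnn; simp at hFnn
  | case3 value i hlt idx v hFnn hGet ih =>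
    -- '(' marker: A adds 2*value while scanning; B records the token, the summing pass doubles it
    simp only [PySem.List.len_eq] at hlt
    rw [pvFindNextNumber_eq] at hFnn
    rcases hO : PySem.Int.ofChars? ('0' :: (PySem.List.pyRange (i + 1) (pvScanEnd cs (i + 1)) 1).map
        (fun k => PySem.List.pyGetD cs k ' ')) with _ | w
    · rw [hO] at hFnn; simp at hFnn
    · rw [hO] at hFnn; simp at hFnn
      obtain ⟨rfl, rfl⟩ := hFnn
      rw [ih]
      conv_rhs => rw [pvTokenize]
      cases hT : pvTokenize cs (pvScanEnd cs (i + 1)) with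
      | none => simp [hlt, hGet, hO, hT]
      | some p => simp [hlt, hGet, hO, hT]; ring
  | case4 value i hlt hGet hPar =>
    -- ']' marker: both stop and report the closing index
    simp only [PySem.List.len_eq] at hlt
    rw [pvTokenize]; simp [hlt, hGet]
  | case5 value i hlt symbol hGet hPar hClose hFnn =>
    simp only [PySem.List.len_eq] at hlt
    rw [pvFindNextNumber_eq] at hFnn
    rw [pvTokenize]
    rcases hO : PySem.Int.ofChars? ('0' :: (PySem.List.pyRange (i + 1) (pvScanEnd cs (i + 1)) 1).map
        (fun k => PySem.List.pyGetD cs k ' ')) with _ | v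
    · simp [hlt, hGet, hClose, hO]
    · rw [hO] at hFnn; simp at hFnn
  | case6 value i hlt symbol hGet hPar hClose idx v hFnn ih =>
    -- any other marker: A adds the value once; B's summing pass leaves the token value single
    simp only [PySem.List.len_eq] at hlt
    rw [pvFindNextNumber_eq] at hFnn
    rcases hO : PySem.Int.ofChars? ('0' :: (PySem.List.pyRange (i + 1) (pvScanEnd cs (i + 1)) 1).map
        (fun k => PySem.List.pyGetD cs k ' ')) with _ | w
    · rw [hO] at hFnn; simp at hFnn
    · rw [hO] at hFnn; simp at hFnn
      obtain ⟨rfl, rfl⟩ := hFnn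
      rw [ih]
      conv_rhs => rw [pvTokenize]
      cases hT : pvTokenize cs (pvScanEnd cs (i + 1)) with
      | none => simp [hlt, hGet, hClose, hO, hT]
      | some p => simp [hlt, hGet, hClose, hPar, hO, hT]; ring
  | case7 value i hlt =>
    simp only [PySem.List.len_eq] at hlt
    rw [pvTokenize]; simp [hlt]

-- ===== VERDICT (by name: the statement is the Claim_ definition above) =====
theorem middle_bracket_evaluate_spec : Claim_equal_middle_bracket_evaluate := by
  intro e s _ _
  unfold Spec_middle_bracket_evaluate middle_bracket_evaluate middle_bracket_evaluate_alt
  rw [pvLoop_eq_tokenize]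
  cases pvTokenize e.toList s with
  | none => rfl
  | some p => simp
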